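-- pv_equiv track=rewrite | github.com/cff29546/pzmap2dzi | pzmap2dzi/i18n_util.py | yaml_item2json_aio
-- ===== SOURCE A (Python) =====
-- def concat_dict(data, splitor):
--     kvs = []
--     for k, v in data.items():
--         kvs.append(k + ':' + v)
--     return splitor.join(sorted(kvs))
--
-- TEXT_KEYS = ['name', 'desc']
--
-- def yaml_item2json_aio(y, splitor='&&'):
--     j = {}
--     for key in y:
--         if key.split('_')[0] in TEXT_KEYS:
--             k, v = key.split('_', 1)
--             if k not in j:
--                 j[k] = {}
--             j[k][v] = y[key]
--         else:
--             j[key] = y[key]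
--     for key in TEXT_KEYS:
--         j[key] = concat_dict(j.get(key, {}), splitor)
--     return j
-- ===== SOURCE B (Python) =====
-- TEXT_KEYS = ['name', 'desc']
--
-- def yaml_item2json_aio(y, splitor='&&'):
--     # Stage 1: compute every text key's final joined string up-front, by a
--     # filtered scan of y per text key (no grouping dicts/lists are built).
--     texts = {t: splitor.join(sorted(
--                 key.split('_', 1)[1] + ':' + y[key]
--                 for key in y if key.split('_', 1)[0] == t))
--              for t in TEXT_KEYS}
--     # Stage 2: one ordering pass — emit plain keys as-is and drop each text
--     # key's ready-made string in at the group's first-occurrence position.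
--     j = {}
--     for key in y:
--         t = key.split('_', 1)[0]
--         if t in TEXT_KEYS:
--             if t not in j:
--                 j[t] = texts[t]
--         else:
--             j[key] = y[key]
--     for t in TEXT_KEYS:
--         if t not in j:
--             j[t] = texts[t]
--     return j
-- ===== Notes on version B (the rewrite author's own statement) =====
-- stated objective: alternative
-- what changed: B never builds A's nested per-prefix dicts: it first computes each text key's final joined string by a filtered comprehension scan of y per TEXT_KEY, then a single ordering pass places those ready-made strings at each group's first-occurrence position, so concat_dict and the intermediate grouping structure disappear.
-- outside the precondition, e.g. on yaml_item2json_aio({'name': 'x'}, '&&'): A raises ValueError, B raises IndexError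
import Mathlib
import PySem

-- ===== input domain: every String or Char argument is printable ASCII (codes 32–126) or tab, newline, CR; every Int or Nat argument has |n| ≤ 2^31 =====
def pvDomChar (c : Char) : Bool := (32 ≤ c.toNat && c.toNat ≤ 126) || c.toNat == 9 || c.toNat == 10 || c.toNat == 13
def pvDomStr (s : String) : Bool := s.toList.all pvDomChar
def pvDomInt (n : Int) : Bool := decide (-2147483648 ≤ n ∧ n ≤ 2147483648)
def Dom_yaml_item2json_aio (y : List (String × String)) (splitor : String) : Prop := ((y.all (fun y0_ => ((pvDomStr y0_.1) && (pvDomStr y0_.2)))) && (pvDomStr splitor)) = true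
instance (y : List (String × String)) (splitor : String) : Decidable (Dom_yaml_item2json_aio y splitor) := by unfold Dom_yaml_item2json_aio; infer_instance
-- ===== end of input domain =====

-- B replaces A's nested per-prefix dicts and concat_dict by precomputing every text key's
-- final joined string with a filtered scan of y, then one ordering pass (objective: alternative).

-- ===== PORT A =====
def pvTextKeys : List String := ["name", "desc"]

def concat_dict (data : PySem.Dict String String) (splitor : String) : String :=
  let kvs := data.items.foldl (fun acc p => acc ++ [p.1 ++ ":" ++ p.2]) ([] : List String)
  PySem.Str.join splitor (PySem.List.sorted kvs (fun s => s) false)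

-- loop body of A's first 'for key in y' (j is Python's heterogeneous dict:
-- text keys hold an inner dict = Sum.inr, other keys a plain string = Sum.inl)
def pvStepA (j : PySem.Dict String (String ⊕ PySem.Dict String String)) (kv : String × String) :
    PySem.Dict String (String ⊕ PySem.Dict String String) :=
  if ((PySem.Str.split? kv.1 "_").getD []).headD "" ∈ pvTextKeys then
    match (PySem.Str.splitMax? kv.1 "_" 1).getD [] with
    | [k, v] =>
      let j1 := if j.contains k then j else j.insert k (Sum.inr PySem.Dict.empty)
      match j1.get? k with
      | some (Sum.inr d) => j1.insert k (Sum.inr (d.insert v kv.2))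
      | _ => j1  -- Python's j[k][v]=… on a non-dict: unreachable, j[k] is always an inner dict here
    | _ => j     -- 'k, v = key.split('_', 1)' raises ValueError (bare 'name'/'desc'); excluded by Pre_
  else j.insert kv.1 (Sum.inl kv.2)

def yaml_item2json_aio (y : List (String × String)) (splitor : String) : List (String × String) :=
  let j := y.foldl pvStepA PySem.Dict.empty
  let j := pvTextKeys.foldl (fun j key =>
      j.insert key (Sum.inl (concat_dict
        (match j.get? key with | some (Sum.inr d) => d | _ => PySem.Dict.empty) splitor))) j
  -- every value is a string (Sum.inl) at return; extract them (typing of the heterogeneous dict)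
  j.items.map (fun p => (p.1, match p.2 with | Sum.inl s => s | Sum.inr _ => ""))

-- ===== PORT B =====
-- key.split('_', 1)[0]
def pvHeadB (key : String) : String :=
  ((PySem.Str.splitMax? key "_" 1).getD []).headD ""

-- key.split('_', 1)[1] + ':' + y[key]; the [1] raises IndexError on a bare 'name'/'desc'
-- key (excluded by Pre_)
def pvFmt (kv : String × String) : String :=
  (((PySem.Str.splitMax? kv.1 "_" 1).getD []).getD 1 "") ++ ":" ++ kv.2

-- the filtered generator '… for key in y if key.split('_', 1)[0] == t'
def pvGroup (y : List (String × String)) (t : String) : List String :=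
  y.foldl (fun acc kv => if pvHeadB kv.1 == t then acc ++ [pvFmt kv] else acc) []

-- texts[t] = splitor.join(sorted(<generator>))
def pvTexts (y : List (String × String)) (splitor t : String) : String :=
  PySem.Str.join splitor (PySem.List.sorted (pvGroup y t) (fun s => s) false)

-- loop body of B's ordering pass
def pvStepB (texts : PySem.Dict String String) (j : PySem.Dict String String)
    (kv : String × String) : PySem.Dict String String :=
  let t := pvHeadB kv.1
  if t ∈ pvTextKeys then
    if j.contains t then j else j.insert t (texts.getD t "")  -- texts[t]: every TEXT_KEY is in texts
  else j.insert kv.1 kv.2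

def yaml_item2json_aio_alt (y : List (String × String)) (splitor : String) : List (String × String) :=
  let texts := pvTextKeys.foldl (fun d t => d.insert t (pvTexts y splitor t)) PySem.Dict.empty
  let j := y.foldl (pvStepB texts) PySem.Dict.empty
  let j := pvTextKeys.foldl (fun j t =>
      if j.contains t then j else j.insert t (texts.getD t "")) j
  j.items

-- ===== PRECONDITION & SPEC =====
-- y is a Python dict: its association-list representation has pairwise-distinct keys
-- (representation invariant); a bare 'name' or 'desc' key makes A raise ValueError
-- ('k, v = key.split('_', 1)' yields one element) and is excluded.
def Pre_yaml_item2json_aio (y : List (String × String)) (splitor : String) : Prop :=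
  (y.map Prod.fst).Nodup ∧ ∀ p ∈ y, p.1 ≠ "name" ∧ p.1 ≠ "desc"
instance (y : List (String × String)) (splitor : String) : Decidable (Pre_yaml_item2json_aio y splitor) := by
  unfold Pre_yaml_item2json_aio; infer_instance

def pvWitness_yaml_item2json_aio : (List (String × String)) × String :=
  ([("name_en", "Axe"), ("desc_en", "chops"), ("id", "7"), ("name_fr", "Hache")], "&&")

def Spec_yaml_item2json_aio (y : List (String × String)) (splitor : String) (out : List (String × String)) : Prop := out = yaml_item2json_aio_alt y splitor
instance (y : List (String × String)) (splitor : String) (out : List (String × String)) : Decidable (Spec_yaml_item2json_aio y splitor out) := by unfold Spec_yaml_item2json_aio; infer_instance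

-- ===== CLAIM (what is proved, stated in full; the proofs are below) =====
def Claim_equal_yaml_item2json_aio : Prop := ∀ (y : List (String × String)) (splitor : String), Dom_yaml_item2json_aio y splitor → Pre_yaml_item2json_aio y splitor → Spec_yaml_item2json_aio y splitor (yaml_item2json_aio y splitor)

-- ===== LEMMAS AND PROOFS =====

-- ---- facts about split('_') / split('_', 1) ----

lemma pvGo0 (fuel : Nat) (l : List Char) (acc : List (List Char)) :
    PySem.Chars.splitOnMax.go ['_'] fuel 0 l [] acc = (l :: acc).reverse := by
  cases fuel with
  | zero => simp [PySem.Chars.splitOnMax.go]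
  | succ n => cases l <;> simp [PySem.Chars.splitOnMax.go]

lemma pvGo1 (fuel : Nat) : ∀ (l cur : List Char) (acc : List (List Char)), l.length < fuel →
    PySem.Chars.splitOnMax.go ['_'] fuel 1 l cur acc =
      if '_' ∈ l then
        ((l.dropWhile (· ≠ '_')).tail :: (cur.reverse ++ l.takeWhile (· ≠ '_')) :: acc).reverse
      else ((cur.reverse ++ l) :: acc).reverse := by
  induction fuel with
  | zero => intro l cur acc h; omega
  | succ n ih =>
    intro l cur acc h
    cases l with
    | nil => simp [PySem.Chars.splitOnMax.go]
    | cons c rest =>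
      by_cases hc : c = '_'
      · subst hc
        simp [PySem.Chars.splitOnMax.go, List.isPrefixOf, pvGo0, List.takeWhile, List.dropWhile]
      · have hp : (['_'] : List Char).isPrefixOf (c :: rest) = false := by
          simp [List.isPrefixOf]; exact fun h' => hc h'.symm
        have hlen : rest.length < n := by simpa using h
        simp only [PySem.Chars.splitOnMax.go, hp]
        rw [show (PySem.Chars.splitOnMax.go ['_'] n 1 rest (c :: cur) acc) = _ from ih rest (c :: cur) acc hlen]
        by_cases hm : '_' ∈ rest
        · have : '_' ∈ c :: rest := List.mem_cons_of_mem _ hm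
          simp [hm, this, List.takeWhile, List.dropWhile, hc]
        · have : ¬ '_' ∈ c :: rest := by simp [hm, Ne.symm hc]
          simp [hm, this]

lemma pvGoS (fuel : Nat) : ∀ (l cur : List Char) (acc : List (List Char)), l.length < fuel →
    ∃ rest, PySem.Chars.splitOn.go ['_'] fuel l cur acc =
      acc.reverse ++ (cur.reverse ++ l.takeWhile (· ≠ '_')) :: rest := by
  induction fuel with
  | zero => intro l cur acc h; omega
  | succ n ih =>
    intro l cur acc h
    cases l with
    | nil => exact ⟨[], by simp [PySem.Chars.splitOn.go]⟩
    | cons c rest =>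
      by_cases hc : c = '_'
      · subst hc
        have hp : (['_'] : List Char).isPrefixOf ('_' :: rest) = true := by simp [List.isPrefixOf]
        obtain ⟨r, hr⟩ := ih rest [] (cur.reverse :: acc) (by simpa using h)
        refine ⟨List.takeWhile (fun x => decide (x ≠ '_')) rest :: r, ?_⟩
        simp only [PySem.Chars.splitOn.go, hp, if_pos]
        rw [show List.drop ['_'].length ('_' :: rest) = rest from by simp]
        rw [hr]
        simp [List.takeWhile]
      · have hp : (['_'] : List Char).isPrefixOf (c :: rest) = false := by
          simp [List.isPrefixOf]; exact fun h' => hc h'.symm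
        obtain ⟨r, hr⟩ := ih rest (c :: cur) acc (by simpa using h)
        refine ⟨r, ?_⟩
        simp only [PySem.Chars.splitOn.go, hp]
        rw [hr]
        simp [List.takeWhile, hc]

-- key.split('_', 1) in closed form
lemma pvSplitOnMax_one (cs : List Char) :
    PySem.Chars.splitOnMax cs ['_'] 1 =
      if '_' ∈ cs then [cs.takeWhile (· ≠ '_'), (cs.dropWhile (· ≠ '_')).tail] else [cs] := by
  have h1 : ¬ ((1 : Int) < 0) := by norm_num
  rw [PySem.Chars.splitOnMax, if_neg h1]
  rw [show (1 : Int).toNat = 1 from rfl]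
  rw [pvGo1 (cs.length + 1) cs [] [] (by omega)]
  split_ifs <;> simp

lemma pvSplitOn_head (cs : List Char) :
    ∃ rest, PySem.Chars.splitOn cs ['_'] = cs.takeWhile (· ≠ '_') :: rest := by
  obtain ⟨r, hr⟩ := pvGoS (cs.length + 1) cs [] [] (by omega)
  exact ⟨r, by simpa [PySem.Chars.splitOn] using hr⟩

-- A tests key.split('_')[0], B tests key.split('_', 1)[0]: the same first segment
lemma pvHeads_eq (key : String) :
    ((PySem.Str.split? key "_").getD []).headD "" = pvHeadB key := by
  obtain ⟨r, hr⟩ := pvSplitOn_head key.toList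
  have hs : PySem.Str.split? key "_" = some ((PySem.Chars.splitOn key.toList ['_']).map String.ofList) := by
    simp [PySem.Str.split?, PySem.Chars.split?]
  have hm : PySem.Str.splitMax? key "_" 1 = some ((PySem.Chars.splitOnMax key.toList ['_'] 1).map String.ofList) := by
    simp [PySem.Str.splitMax?, PySem.Chars.splitMax?]
  rw [pvHeadB, hs, hm, pvSplitOnMax_one, hr]
  by_cases h : '_' ∈ key.toList
  · simp [h]
  · have ht : List.takeWhile (fun x => !decide (x = '_')) key.toList = key.toList := by
      rw [List.takeWhile_eq_self_iff]; intro c hc; simp; exact fun he => h (he ▸ hc)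
    simp [h, ht, String.ofList_toList]

-- a key containing '_' splits into exactly two parts that reassemble to the key
lemma pvSplit2_shape (key : String) (h : '_' ∈ key.toList) :
    ∃ k v : String, (PySem.Str.splitMax? key "_" 1).getD [] = [k, v] ∧ key = k ++ "_" ++ v := by
  have hm : PySem.Str.splitMax? key "_" 1 = some ((PySem.Chars.splitOnMax key.toList ['_'] 1).map String.ofList) := by
    simp [PySem.Str.splitMax?, PySem.Chars.splitMax?]
  refine ⟨String.ofList (key.toList.takeWhile (· ≠ '_')),
         String.ofList ((key.toList.dropWhile (· ≠ '_')).tail), ?_, ?_⟩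
  · rw [hm, pvSplitOnMax_one, if_pos h]; simp
  · apply String.toList_inj.mp
    rw [String.toList_append, String.toList_append, String.toList_ofList, String.toList_ofList]
    have hd : key.toList.dropWhile (· ≠ '_') ≠ [] := by
      intro hnil
      have hta := List.takeWhile_append_dropWhile (p := fun x => decide (x ≠ '_')) (l := key.toList)
      rw [hnil, List.append_nil] at hta
      rw [← hta] at h
      have := List.mem_takeWhile_imp h
      simp at this
    have hhead : (key.toList.dropWhile (· ≠ '_')).head hd = '_' := by
      have := List.head_dropWhile_not (p := fun x => decide (x ≠ '_')) (l := key.toList) hd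
      simpa using this
    rw [String.toList_ofList]
    conv_lhs => rw [← List.takeWhile_append_dropWhile (p := fun x => decide (x ≠ '_')) (l := key.toList)]
    rw [List.append_assoc]
    congr 1
    conv_lhs => rw [← List.cons_head_tail hd]
    rw [hhead]
    simp

lemma pvSplit2_nou (key : String) (h : ¬ '_' ∈ key.toList) :
    (PySem.Str.splitMax? key "_" 1).getD [] = [key] := by
  have hm : PySem.Str.splitMax? key "_" 1 = some ((PySem.Chars.splitOnMax key.toList ['_'] 1).map String.ofList) := by
    simp [PySem.Str.splitMax?, PySem.Chars.splitMax?]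
  rw [hm, pvSplitOnMax_one, if_neg h]
  simp [String.ofList_toList]

-- ---- relating A's heterogeneous dict to B's dict of finished strings ----

-- what an A-dict entry will look like in the final output: a plain string stays,
-- a text group at key t becomes the (precomputed) final joined string pvTexts y sp t
def pvF (y : List (String × String)) (sp : String)
    (p : String × (String ⊕ PySem.Dict String String)) : String × String :=
  (p.1, match p.2 with | Sum.inl s => s | Sum.inr _ => pvTexts y sp p.1)

lemma pvKeys_eq (y : List (String × String)) (sp : String)
    (jA : PySem.Dict String (String ⊕ PySem.Dict String String))
    (jB : PySem.Dict String String)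
    (h : jA.items.map (pvF y sp) = jB.items) : jA.keys = jB.keys := by
  have hk : jB.keys = jB.items.map Prod.fst := rfl
  rw [hk, ← h]
  simp [PySem.Dict.keys, List.map_map, Function.comp, pvF]

lemma pvContains_eq (y : List (String × String)) (sp : String)
    (jA : PySem.Dict String (String ⊕ PySem.Dict String String))
    (jB : PySem.Dict String String)
    (h : jA.items.map (pvF y sp) = jB.items) (k : String) :
    jA.contains k = jB.contains k := by
  rw [PySem.Dict.contains_eq_decide_mem_keys, PySem.Dict.contains_eq_decide_mem_keys,
      pvKeys_eq y sp jA jB h]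

-- inserting w into A corresponds to inserting its final string into B
lemma pvExtIns (y : List (String × String)) (sp : String)
    (jA : PySem.Dict String (String ⊕ PySem.Dict String String))
    (jB : PySem.Dict String String)
    (h : jA.items.map (pvF y sp) = jB.items)
    (k : String) (w : String ⊕ PySem.Dict String String) :
    (jA.insert k w).items.map (pvF y sp) = (jB.insert k ((pvF y sp (k, w)).2)).items := by
  rw [PySem.Dict.items_insert, PySem.Dict.items_insert, pvContains_eq y sp jA jB h k]
  by_cases hc : jB.contains k = true
  · rw [if_pos hc, if_pos hc, ← h, List.map_map, List.map_map]
    apply List.map_congr_left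
    intro p _
    by_cases hk : p.1 == k
    · simp [Function.comp, hk, pvF]
    · have hkf : (p.1 == k) = false := by simpa using hk
      simp [Function.comp, hkf, pvF]
  · rw [if_neg hc, if_neg hc, List.map_append, h]
    simp [pvF]

-- overwriting a key whose final string stays the same leaves the B-image unchanged
lemma pvOverwrite (y : List (String × String)) (sp : String)
    (jA : PySem.Dict String (String ⊕ PySem.Dict String String))
    (hnd : jA.keys.Nodup) (k : String) (w old : String ⊕ PySem.Dict String String)
    (hget : jA.get? k = some old)
    (hv : (pvF y sp (k, w)).2 = (pvF y sp (k, old)).2) :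
    (jA.insert k w).items.map (pvF y sp) = jA.items.map (pvF y sp) := by
  have hc : jA.contains k = true := by
    rw [PySem.Dict.contains_eq_isSome_get?, hget]; rfl
  rw [PySem.Dict.items_insert_of_contains _ _ hc, List.map_map]
  apply List.map_congr_left
  intro p hp
  by_cases hk : p.1 == k
  · have hk' : p.1 = k := by simpa using hk
    have hpv : jA.get? p.1 = some p.2 :=
      PySem.Dict.get?_of_mem_items jA (by simpa using hp) hnd
    rw [hk', hget] at hpv
    have hold : p.2 = old := by injection hpv with h; exact h.symm
    have : pvF y sp (k, w) = pvF y sp p := by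
      rw [show p = (k, old) from by rw [← hk', ← hold]]
      exact Prod.ext rfl hv
    simp [Function.comp, hk, this]
  · have hkf : (p.1 == k) = false := by simpa using hk
    simp [Function.comp, hkf]

-- one snoc-step of the per-text-key filter comprehension
lemma pvGroup_snoc (l : List (String × String)) (kv : String × String) (t : String) :
    pvGroup (l ++ [kv]) t =
      if pvHeadB kv.1 == t then pvGroup l t ++ [pvFmt kv] else pvGroup l t := by
  rw [pvGroup, pvGroup, List.foldl_append]
  simp [List.foldl]

-- the loop invariant: A's dict maps (via pvF) onto B's, its keys stay distinct, only
-- text keys carry inner dicts, and each text key's inner dict lists exactly the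
-- processed part's group strings (with its suffixes never reappearing in `rest`)
def pvInv (y : List (String × String)) (sp : String)
    (jA : PySem.Dict String (String ⊕ PySem.Dict String String))
    (jB : PySem.Dict String String)
    (done rest : List (String × String)) : Prop :=
  jA.keys.Nodup ∧
  jA.items.map (pvF y sp) = jB.items ∧
  (∀ p ∈ jA.items, p.1 ∈ pvTextKeys ∨ ∃ s, p.2 = Sum.inl s) ∧
  ∀ t ∈ pvTextKeys,
    (jA.get? t = none ∧ pvGroup done t = []) ∨
    ∃ d, jA.get? t = some (Sum.inr d) ∧
      d.items.map (fun q => q.1 ++ ":" ++ q.2) = pvGroup done t ∧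
      ∀ v, d.contains v = true → ∀ kv ∈ rest, kv.1 ≠ t ++ "_" ++ v

lemma pvStep_inv (y : List (String × String)) (sp : String)
    (T : PySem.Dict String String) (hT : ∀ t ∈ pvTextKeys, T.getD t "" = pvTexts y sp t)
    (kv : String × String) (done rest : List (String × String))
    (jA : PySem.Dict String (String ⊕ PySem.Dict String String))
    (jB : PySem.Dict String String)
    (hI : pvInv y sp jA jB done (kv :: rest))
    (hnd : ∀ kv' ∈ rest, kv'.1 ≠ kv.1)
    (hkey : kv.1 ≠ "name" ∧ kv.1 ≠ "desc") :
    pvInv y sp (pvStepA jA kv) (pvStepB T jB kv) (done ++ [kv]) rest := by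
  obtain ⟨hndA, hmap, hinl, htext⟩ := hI
  by_cases hin : ((PySem.Str.split? kv.1 "_").getD []).headD "" ∈ pvTextKeys
  · -- text branch
    have hinB : pvHeadB kv.1 ∈ pvTextKeys := by rw [← pvHeads_eq]; exact hin
    have hu : '_' ∈ kv.1.toList := by
      by_contra hnu
      rw [pvHeadB, pvSplit2_nou kv.1 hnu] at hinB
      simp [pvTextKeys] at hinB
      rcases hinB with h1 | h1 <;> simp [h1] at hkey
    obtain ⟨k, v, hparts, hre⟩ := pvSplit2_shape kv.1 hu
    have hhk : pvHeadB kv.1 = k := by rw [pvHeadB, hparts]; rfl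
    have hkTK : k ∈ pvTextKeys := hhk ▸ hinB
    have hfmt : pvFmt kv = v ++ ":" ++ kv.2 := by rw [pvFmt, hparts]; rfl
    have hstepA : pvStepA jA kv =
        (let j1 := if jA.contains k then jA else jA.insert k (Sum.inr PySem.Dict.empty)
         match j1.get? k with
         | some (Sum.inr d) => j1.insert k (Sum.inr (d.insert v kv.2))
         | _ => j1) := by
      rw [pvStepA, pvHeads_eq, if_pos hinB, hparts]
    have hstepB : pvStepB T jB kv =
        (if jB.contains k then jB else jB.insert k (T.getD k "")) := by
      rw [pvStepB]
      simp only [hhk]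
      rw [if_pos hkTK]
    have hcontEq := pvContains_eq y sp jA jB hmap k
    rcases htext k hkTK with ⟨hA0, hg0⟩ | ⟨d, hAd, hgd, hfresh⟩
    · -- first pair of this group
      have hcont : jA.contains k = false := by
        rw [PySem.Dict.contains_eq_isSome_get?, hA0]; rfl
      have hA1 : pvStepA jA kv = jA.insert k (Sum.inr (PySem.Dict.empty.insert v kv.2)) := by
        rw [hstepA]
        simp only [hcont, Bool.false_eq_true, if_false, PySem.Dict.get?_insert_self,
          PySem.Dict.insert_insert_self]
      have hB1 : pvStepB T jB kv = jB.insert k (pvTexts y sp k) := by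
        rw [hstepB, if_neg (by rw [← hcontEq, hcont]; simp), hT k hkTK]
      rw [hA1, hB1]
      refine ⟨PySem.Dict.nodup_keys_insert _ _ _ hndA, ?_, ?_, ?_⟩
      · exact pvExtIns y sp jA jB hmap k _
      · intro p hp
        rcases (PySem.Dict.mem_items_insert _ _ _ _).mp hp with hpe | ⟨hpm, _⟩
        · exact Or.inl (by rw [hpe]; exact hkTK)
        · exact hinl p hpm
      · intro t ht
        by_cases htk : t = k
        · subst htk
          refine Or.inr ⟨PySem.Dict.empty.insert v kv.2, PySem.Dict.get?_insert_self _ _ _, ?_, ?_⟩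
          · rw [PySem.Dict.items_insert_of_not_contains _ _ (PySem.Dict.contains_empty _)]
            rw [pvGroup_snoc, hhk, if_pos (by simp), hg0, hfmt]
            rfl
          · intro v' hv' kv' hkv'
            rw [PySem.Dict.contains_insert] at hv'
            simp [PySem.Dict.contains_empty] at hv'
            subst hv'
            rw [← hre]
            exact hnd kv' hkv'
        · have hbeq : (pvHeadB kv.1 == t) = false := by
            rw [hhk]; simpa using fun he => htk he.symm
          rcases htext t ht with ⟨ha, hb⟩ | ⟨d', ha, hb, hf⟩
          · exact Or.inl ⟨by rw [PySem.Dict.get?_insert_of_ne _ _ htk, ha],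
              by rw [pvGroup_snoc, hbeq]; simpa using hb⟩
          · exact Or.inr ⟨d', by rw [PySem.Dict.get?_insert_of_ne _ _ htk, ha],
              by rw [pvGroup_snoc, hbeq]; simpa using hb,
              fun v' hv' kv' hkv' => hf v' hv' kv' (List.mem_cons_of_mem _ hkv')⟩
    · -- the group already exists
      have hcont : jA.contains k = true := by
        rw [PySem.Dict.contains_eq_isSome_get?, hAd]; rfl
      have hdv : d.contains v = false := by
        by_contra hc
        have hc' : d.contains v = true := by revert hc; cases d.contains v <;> simp
        exact (hfresh v hc' kv (List.mem_cons_self)) (by rw [← hre])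
      have hA1 : pvStepA jA kv = jA.insert k (Sum.inr (d.insert v kv.2)) := by
        rw [hstepA]
        simp only [hcont, if_true, hAd]
      have hB1 : pvStepB T jB kv = jB := by
        rw [hstepB, if_pos (by rw [← hcontEq]; exact hcont)]
      rw [hA1, hB1]
      refine ⟨PySem.Dict.nodup_keys_insert _ _ _ hndA, ?_, ?_, ?_⟩
      · rw [pvOverwrite y sp jA hndA k (Sum.inr (d.insert v kv.2)) (Sum.inr d) hAd rfl]
        exact hmap
      · intro p hp
        rcases (PySem.Dict.mem_items_insert _ _ _ _).mp hp with hpe | ⟨hpm, _⟩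
        · exact Or.inl (by rw [hpe]; exact hkTK)
        · exact hinl p hpm
      · intro t ht
        by_cases htk : t = k
        · subst htk
          refine Or.inr ⟨d.insert v kv.2, PySem.Dict.get?_insert_self _ _ _, ?_, ?_⟩
          · rw [PySem.Dict.items_insert_of_not_contains _ _ hdv]
            rw [pvGroup_snoc, hhk, if_pos (by simp), ← hgd, hfmt]
            simp
          · intro v' hv' kv' hkv'
            rw [PySem.Dict.contains_insert] at hv'
            rcases (by simpa using hv' : v' = v ∨ d.contains v' = true) with he | hold
            · subst he; rw [← hre]; exact hnd kv' hkv'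
            · exact hfresh v' hold kv' (List.mem_cons_of_mem _ hkv')
        · have hbeq : (pvHeadB kv.1 == t) = false := by
            rw [hhk]; simpa using fun he => htk he.symm
          rcases htext t ht with ⟨ha, hb⟩ | ⟨d', ha, hb, hf⟩
          · exact Or.inl ⟨by rw [PySem.Dict.get?_insert_of_ne _ _ htk, ha],
              by rw [pvGroup_snoc, hbeq]; simpa using hb⟩
          · exact Or.inr ⟨d', by rw [PySem.Dict.get?_insert_of_ne _ _ htk, ha],
              by rw [pvGroup_snoc, hbeq]; simpa using hb,
              fun v' hv' kv' hkv' => hf v' hv' kv' (List.mem_cons_of_mem _ hkv')⟩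
  · -- plain key
    have hinB : ¬ pvHeadB kv.1 ∈ pvTextKeys := by rw [← pvHeads_eq]; exact hin
    have hne : ∀ t ∈ pvTextKeys, t ≠ kv.1 := by
      intro t ht he
      apply hinB
      rw [← he]
      have hnu : ¬ '_' ∈ t.toList := by
        rcases (by simpa [pvTextKeys] using ht : t = "name" ∨ t = "desc") with h1 | h1 <;>
          (rw [h1]; decide)
      rw [pvHeadB, pvSplit2_nou t hnu]
      simpa using ht
    have hstepA : pvStepA jA kv = jA.insert kv.1 (Sum.inl kv.2) := by
      rw [pvStepA, pvHeads_eq, if_neg hinB]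
    have hstepB : pvStepB T jB kv = jB.insert kv.1 kv.2 := by
      simp only [pvStepB]
      rw [if_neg hinB]
    rw [hstepA, hstepB]
    refine ⟨PySem.Dict.nodup_keys_insert _ _ _ hndA, ?_, ?_, ?_⟩
    · exact pvExtIns y sp jA jB hmap kv.1 _
    · intro p hp
      rcases (PySem.Dict.mem_items_insert _ _ _ _).mp hp with hpe | ⟨hpm, _⟩
      · exact Or.inr ⟨kv.2, by rw [hpe]⟩
      · exact hinl p hpm
    · intro t ht
      have hbeq : (pvHeadB kv.1 == t) = false := by
        simp only [beq_eq_false_iff_ne, ne_eq]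
        intro he
        exact hinB (by rw [he]; exact ht)
      rcases htext t ht with ⟨ha, hb⟩ | ⟨d', ha, hb, hf⟩
      · exact Or.inl ⟨by rw [PySem.Dict.get?_insert_of_ne _ _ (hne t ht), ha],
          by rw [pvGroup_snoc, hbeq]; simpa using hb⟩
      · exact Or.inr ⟨d', by rw [PySem.Dict.get?_insert_of_ne _ _ (hne t ht), ha],
          by rw [pvGroup_snoc, hbeq]; simpa using hb,
          fun v' hv' kv' hkv' => hf v' hv' kv' (List.mem_cons_of_mem _ hkv')⟩

lemma pvLoop_inv (y : List (String × String)) (sp : String)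
    (T : PySem.Dict String String) (hT : ∀ t ∈ pvTextKeys, T.getD t "" = pvTexts y sp t) :
    ∀ (rest done : List (String × String))
      (jA : PySem.Dict String (String ⊕ PySem.Dict String String))
      (jB : PySem.Dict String String),
    done ++ rest = y → pvInv y sp jA jB done rest →
    (∀ kv ∈ rest, kv.1 ≠ "name" ∧ kv.1 ≠ "desc") → (rest.map Prod.fst).Nodup →
    pvInv y sp (rest.foldl pvStepA jA) (rest.foldl (pvStepB T) jB) y [] := by
  intro rest
  induction rest with
  | nil =>
    intro done jA jB hy hI _ _
    rw [List.append_nil] at hy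
    subst hy
    exact hI
  | cons kv rest ih =>
    intro done jA jB hy hI hk hnd
    rw [List.map_cons, List.nodup_cons] at hnd
    have hnd1 : ∀ kv' ∈ rest, kv'.1 ≠ kv.1 := by
      intro kv' h' he
      exact hnd.1 (he ▸ List.mem_map_of_mem h')
    have hstep := pvStep_inv y sp T hT kv done rest jA jB hI hnd1 (hk kv List.mem_cons_self)
    rw [List.foldl_cons, List.foldl_cons]
    exact ih (done ++ [kv]) _ _ (by rw [List.append_assoc]; exact hy) hstep
      (fun kv' h' => hk kv' (List.mem_cons_of_mem _ h')) hnd.2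

-- A's concat_dict over a text key's final inner dict is exactly B's precomputed string
lemma pvFinal_val (y : List (String × String)) (sp : String)
    (jA : PySem.Dict String (String ⊕ PySem.Dict String String)) (t : String)
    (h : (jA.get? t = none ∧ pvGroup y t = []) ∨
      ∃ d, jA.get? t = some (Sum.inr d) ∧
        d.items.map (fun q => q.1 ++ ":" ++ q.2) = pvGroup y t) :
    concat_dict (match jA.get? t with | some (Sum.inr d) => d | _ => PySem.Dict.empty) sp
      = pvTexts y sp t := by
  rcases h with ⟨ha, hb⟩ | ⟨d, ha, hb⟩
  · rw [ha, pvTexts, hb]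
    rfl
  · rw [ha, pvTexts, ← hb, concat_dict]
    simp only [PySem.List.foldl_append_singleton_eq_map, List.nil_append]

-- one iteration of the final 'for key in TEXT_KEYS' passes of A and B, in correspondence
lemma pvFinalStep (y : List (String × String)) (sp : String)
    (T : PySem.Dict String String) (t : String)
    (jA : PySem.Dict String (String ⊕ PySem.Dict String String))
    (jB : PySem.Dict String String)
    (hndA : jA.keys.Nodup)
    (hmap : jA.items.map (pvF y sp) = jB.items)
    (hTt : T.getD t "" = pvTexts y sp t)
    (hsh : jA.get? t = none ∨ ∃ d, jA.get? t = some (Sum.inr d))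
    (hval : concat_dict (match jA.get? t with
      | some (Sum.inr d) => d | _ => PySem.Dict.empty) sp = pvTexts y sp t) :
    (jA.insert t (Sum.inl (concat_dict (match jA.get? t with
        | some (Sum.inr d) => d | _ => PySem.Dict.empty) sp))).items.map (pvF y sp)
      = (if jB.contains t then jB else jB.insert t (T.getD t "")).items := by
  by_cases hc : jA.contains t = true
  · rw [if_pos (by rw [← pvContains_eq y sp jA jB hmap t]; exact hc)]
    rcases hsh with ha | ⟨d, ha⟩
    · rw [PySem.Dict.contains_eq_isSome_get?, ha] at hc; simp at hc
    · rw [pvOverwrite y sp jA hndA t (Sum.inl (concat_dict (match jA.get? t with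
        | some (Sum.inr d) => d | _ => PySem.Dict.empty) sp)) (Sum.inr d) ha (by simpa [pvF] using hval)]
      exact hmap
  · rw [if_neg (by rw [← pvContains_eq y sp jA jB hmap t]; exact hc)]
    rw [pvExtIns y sp jA jB hmap t _]
    rw [show (pvF y sp (t, Sum.inl (concat_dict (match jA.get? t with
        | some (Sum.inr d) => d | _ => PySem.Dict.empty) sp))).2 = pvTexts y sp t from hval]
    rw [hTt]

-- ===== VERDICT (by name: the statement is the Claim_ definition above) =====
theorem yaml_item2json_aio_spec : Claim_equal_yaml_item2json_aio := by
  intro y splitor _ hpre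
  unfold Spec_yaml_item2json_aio
  obtain ⟨hnd, hnm⟩ := hpre
  rw [yaml_item2json_aio, yaml_item2json_aio_alt]
  simp only [pvTextKeys, List.foldl_cons, List.foldl_nil]
  set T : PySem.Dict String String :=
    (PySem.Dict.empty.insert "name" (pvTexts y splitor "name")).insert "desc"
      (pvTexts y splitor "desc") with hTdef
  have hT : ∀ t ∈ pvTextKeys, T.getD t "" = pvTexts y splitor t := by
    intro t ht
    rcases (by simpa [pvTextKeys] using ht : t = "name" ∨ t = "desc") with h1 | h1 <;> subst h1
    · rw [hTdef, PySem.Dict.getD_insert_of_ne _ _ _ (by decide), PySem.Dict.getD_insert_self]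
    · rw [hTdef, PySem.Dict.getD_insert_self]
  have hinit : pvInv y splitor PySem.Dict.empty PySem.Dict.empty [] y := by
    refine ⟨PySem.Dict.nodup_keys_empty, rfl, ?_, fun t _ => Or.inl ⟨PySem.Dict.get?_empty _, rfl⟩⟩
    intro p hp
    rw [show (PySem.Dict.empty :
      PySem.Dict String (String ⊕ PySem.Dict String String)).items = [] from rfl] at hp
    cases hp
  obtain ⟨hndA, hmap, hinl, htext⟩ := pvLoop_inv y splitor T hT y [] PySem.Dict.empty
    PySem.Dict.empty rfl hinit (fun kv h => hnm kv h) hnd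
  set jA := y.foldl pvStepA PySem.Dict.empty with hjA
  set jB := y.foldl (pvStepB T) PySem.Dict.empty with hjB
  -- shape and value facts at the two text keys
  have hshN : jA.get? "name" = none ∨ ∃ d, jA.get? "name" = some (Sum.inr d) := by
    rcases htext "name" (by simp [pvTextKeys]) with ⟨ha, _⟩ | ⟨d, ha, _, _⟩
    exacts [Or.inl ha, Or.inr ⟨d, ha⟩]
  have hshD : jA.get? "desc" = none ∨ ∃ d, jA.get? "desc" = some (Sum.inr d) := by
    rcases htext "desc" (by simp [pvTextKeys]) with ⟨ha, _⟩ | ⟨d, ha, _, _⟩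
    exacts [Or.inl ha, Or.inr ⟨d, ha⟩]
  have hvalN := pvFinal_val y splitor jA "name"
    (by rcases htext "name" (by simp [pvTextKeys]) with ⟨ha, hb⟩ | ⟨d, ha, hb, _⟩
        exacts [Or.inl ⟨ha, hb⟩, Or.inr ⟨d, ha, hb⟩])
  have hvalD := pvFinal_val y splitor jA "desc"
    (by rcases htext "desc" (by simp [pvTextKeys]) with ⟨ha, hb⟩ | ⟨d, ha, hb, _⟩
        exacts [Or.inl ⟨ha, hb⟩, Or.inr ⟨d, ha, hb⟩])
  set cN := concat_dict (match jA.get? "name" with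
    | some (Sum.inr d) => d | _ => PySem.Dict.empty) splitor with hcN
  set jA1 := jA.insert "name" (Sum.inl cN) with hjA1
  set jB1 := if jB.contains "name" then jB else jB.insert "name" (T.getD "name" "") with hjB1
  have hmap1 : jA1.items.map (pvF y splitor) = jB1.items := by
    rw [hjA1, hjB1, hcN]
    exact pvFinalStep y splitor T "name" jA jB hndA hmap
      (hT "name" (by simp [pvTextKeys])) hshN hvalN
  have hndA1 : jA1.keys.Nodup := PySem.Dict.nodup_keys_insert _ _ _ hndA
  have hgD1 : jA1.get? "desc" = jA.get? "desc" := by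
    rw [hjA1]; exact PySem.Dict.get?_insert_of_ne _ _ (by decide)
  have hmap2 :
      (jA1.insert "desc" (Sum.inl (concat_dict (match jA1.get? "desc" with
          | some (Sum.inr d) => d | _ => PySem.Dict.empty) splitor))).items.map (pvF y splitor)
        = (if jB1.contains "desc" then jB1 else jB1.insert "desc" (T.getD "desc" "")).items := by
    refine pvFinalStep y splitor T "desc" jA1 jB1 hndA1 hmap1
      (hT "desc" (by simp [pvTextKeys])) ?_ ?_
    · rw [hgD1]; exact hshD
    · rw [hgD1]; exact hvalD
  -- every entry of A's final dict is a plain string, so A's extraction map is pvF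
  set jA2 := jA1.insert "desc" (Sum.inl (concat_dict (match jA1.get? "desc" with
    | some (Sum.inr d) => d | _ => PySem.Dict.empty) splitor)) with hjA2
  have hall : ∀ p ∈ jA2.items, ∃ s, p.2 = Sum.inl s := by
    intro p hp
    rw [hjA2] at hp
    rcases (PySem.Dict.mem_items_insert _ _ _ _).mp hp with hpe | ⟨hp1, hne1⟩
    · exact ⟨_, by rw [hpe]⟩
    rw [hjA1] at hp1
    rcases (PySem.Dict.mem_items_insert _ _ _ _).mp hp1 with hpe | ⟨hp2, hne2⟩
    · exact ⟨cN, by rw [hpe]⟩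
    rcases hinl p hp2 with htk | hs
    · rcases (by simpa [pvTextKeys] using htk : p.1 = "name" ∨ p.1 = "desc") with h1 | h1
      · exact absurd h1 hne2
      · exact absurd h1 hne1
    · exact hs
  have hext : jA2.items.map (fun p => (p.1, match p.2 with | Sum.inl s => s | Sum.inr _ => ""))
      = jA2.items.map (pvF y splitor) := by
    apply List.map_congr_left
    intro p hp
    obtain ⟨s, hs⟩ := hall p hp
    simp [pvF, hs]
  calc jA2.items.map (fun p => (p.1, match p.2 with | Sum.inl s => s | Sum.inr _ => ""))
      = jA2.items.map (pvF y splitor) := hext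
    _ = _ := hmap2
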